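-- pv_equiv track=rewrite | github.com/sergiusnick/ermakova_pygame | project_pygame.py | is_there_a_combination
-- ===== SOURCE A (Python) =====
-- def is_there_a_combination(level):
--     horizontal = [''.join(i) for i in level]
--     vertical = []
--     for i in range(len(level[0])):
--         stroka = ''
--         for j in range(len(level)):
--             stroka += level[j][i]
--         vertical.append(stroka)
--     for i in range(9):
--         for j in horizontal:
--             if i != '':
--                 if str(i) * 3 in j:
--                     return True
--     for i in range(9):
--         for j in vertical:
--             if i != '':
--                 if str(i) * 3 in j:
--                     return True
--     return False
-- ===== SOURCE B (Python) =====
-- def is_there_a_combination(level):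
--     def has_run(line):
--         return any(a == b == c and '0' <= a <= '8'
--                    for a, b, c in zip(line, line[1:], line[2:]))
--     if any(has_run(''.join(row)) for row in level):
--         return True
--     width = min((len(row) for row in level), default=0)
--     return any(has_run(''.join(row[i] for row in level)) for i in range(width))
-- ===== Notes on version B (the rewrite author's own statement) =====
-- stated objective: simpler
-- what changed: Replaced A's two 9-digit-by-substring-search loop nests (building 'ddd' strings and searching every joined line for each digit) with a single adjacent-triple run scan per joined row/column line, columns taken by truncation to the shortest row.
import Mathlib
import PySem

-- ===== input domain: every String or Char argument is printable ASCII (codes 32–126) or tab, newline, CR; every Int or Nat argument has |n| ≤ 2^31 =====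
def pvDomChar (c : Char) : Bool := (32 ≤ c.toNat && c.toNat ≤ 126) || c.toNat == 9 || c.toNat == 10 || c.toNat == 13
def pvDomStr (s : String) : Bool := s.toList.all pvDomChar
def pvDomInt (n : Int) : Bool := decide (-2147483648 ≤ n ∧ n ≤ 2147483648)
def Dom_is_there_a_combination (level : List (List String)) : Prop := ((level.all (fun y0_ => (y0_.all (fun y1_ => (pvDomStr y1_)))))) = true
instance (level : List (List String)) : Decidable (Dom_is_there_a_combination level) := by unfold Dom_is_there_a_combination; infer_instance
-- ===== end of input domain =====

-- B replaces A's 9-digit × substring-search double loops by a single adjacent-triple run scan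
-- over the same joined row/column lines (objective: simpler).
-- A raises IndexError on an empty level or a row shorter than the first row; Pre_ excludes exactly those inputs.


-- ===== PORT A =====
-- literal port of A; Python's 'if i != ""' compares an int with a str and is always True,
-- so it adds nothing to the Bool expression.  level[0] / level[j][i] raise outside Pre_,
-- here headD/pyGetD with a dummy default stand in on those excluded inputs.
def is_there_a_combination (level : List (List String)) : Bool :=
  let horizontal := level.map (fun i => PySem.Str.join "" i)
  let vertical := (PySem.List.pyRange 0 (PySem.List.len (level.headD [])) 1).map
      (fun i => level.foldl (fun stroka row => stroka ++ PySem.List.pyGetD row i "") "")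
  if (PySem.List.pyRange 0 9 1).any (fun i =>
        horizontal.any (fun j =>
          PySem.Str.isIn (PySem.Int.toStr i ++ PySem.Int.toStr i ++ PySem.Int.toStr i) j)) then true
  else if (PySem.List.pyRange 0 9 1).any (fun i =>
        vertical.any (fun j =>
          PySem.Str.isIn (PySem.Int.toStr i ++ PySem.Int.toStr i ++ PySem.Int.toStr i) j)) then true
  else false

-- ===== PORT B =====
-- has_run: any adjacent triple of equal characters in '0'..'8' (zip(line, line[1:], line[2:]))
def pvHasRun : List Char → Bool
  | a :: b :: c :: rest =>
      (a == b && b == c && decide ('0' ≤ a) && decide (a ≤ '8')) || pvHasRun (b :: c :: rest)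
  | _ => false

def is_there_a_combination_alt (level : List (List String)) : Bool :=
  if level.any (fun row => pvHasRun (PySem.Str.join "" row).toList) then true
  else
    let width := PySem.List.minD (level.map (fun row => row.length)) id 0
    (List.range width).any (fun i =>
      pvHasRun (PySem.Str.join "" (level.map (fun row => row.getD i ""))).toList)

-- ===== PRECONDITION & SPEC =====
-- A raises IndexError on an empty level (level[0]) and whenever some row is shorter than the
-- first row (level[j][i] in the column loop); exactly those inputs are excluded.
def Pre_is_there_a_combination (level : List (List String)) : Prop :=
  level ≠ [] ∧ ∀ row ∈ level, (level.headD []).length ≤ row.length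
instance (level : List (List String)) : Decidable (Pre_is_there_a_combination level) := by
  unfold Pre_is_there_a_combination; infer_instance
def pvWitness_is_there_a_combination : List (List String) := [["1","2"],["3","4"]]

def Spec_is_there_a_combination (level : List (List String)) (out : Bool) : Prop :=
  out = is_there_a_combination_alt level
instance (level : List (List String)) (out : Bool) : Decidable (Spec_is_there_a_combination level out) := by
  unfold Spec_is_there_a_combination; infer_instance

-- ===== CLAIM (what is proved, stated in full; the proofs are below) =====
def Claim_equal_is_there_a_combination : Prop := ∀ (level : List (List String)), Dom_is_there_a_combination level → Pre_is_there_a_combination level → Spec_is_there_a_combination level (is_there_a_combination level)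


-- ===== LEMMAS AND PROOFS =====

theorem pvHasRun_iff (L : List Char) :
    pvHasRun L = true ↔ ∃ c, '0' ≤ c ∧ c ≤ '8' ∧ [c, c, c] <:+: L := by
  induction L using pvHasRun.induct with
  | case1 a b c rest ih =>
    simp only [pvHasRun, Bool.or_eq_true, Bool.and_eq_true, beq_iff_eq, decide_eq_true_eq, ih,
      List.infix_cons_iff, List.cons_prefix_cons, List.nil_prefix, and_true]
    constructor
    · rintro (⟨⟨⟨rfl, rfl⟩, h1⟩, h2⟩ | ⟨d, h1, h2, h3⟩)
      · exact ⟨a, h1, h2, Or.inl ⟨rfl, rfl, rfl⟩⟩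
      · exact ⟨d, h1, h2, Or.inr h3⟩
    · rintro ⟨d, h1, h2, ⟨h4, h5, h6⟩ | h3⟩
      · subst h4; subst h5; subst h6; exact Or.inl ⟨⟨⟨rfl, rfl⟩, h1⟩, h2⟩
      · exact Or.inr ⟨d, h1, h2, h3⟩
  | case2 L h =>
    rcases L with _ | ⟨x, _ | ⟨y, _ | ⟨z, t⟩⟩⟩
    · simp [pvHasRun]
    · simp only [pvHasRun, Bool.false_eq_true, false_iff]
      rintro ⟨d, _, _, h3⟩
      simpa using h3.length_le
    · simp only [pvHasRun, Bool.false_eq_true, false_iff]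
      rintro ⟨d, _, _, h3⟩
      simpa using h3.length_le
    · exact (h x y z t rfl).elim

theorem pvDigit_cases (c : Char) (h1 : '0' ≤ c) (h2 : c ≤ '8') :
    c = '0' ∨ c = '1' ∨ c = '2' ∨ c = '3' ∨ c = '4' ∨ c = '5' ∨ c = '6' ∨ c = '7' ∨ c = '8' := by
  have b1 : 48 ≤ c.toNat := by
    simpa [Char.le_def, UInt32.le_iff_toNat_le] using h1
  have b2 : c.toNat ≤ 56 := by
    simpa [Char.le_def, UInt32.le_iff_toNat_le] using h2
  have key : ∀ (d : Char), c.toNat = d.toNat → c = d := fun d hd =>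
    Char.ext (UInt32.toNat_inj.mp hd)
  have hv : c.toNat = 48 ∨ c.toNat = 49 ∨ c.toNat = 50 ∨ c.toNat = 51 ∨ c.toNat = 52 ∨
      c.toNat = 53 ∨ c.toNat = 54 ∨ c.toNat = 55 ∨ c.toNat = 56 := by omega
  rcases hv with h|h|h|h|h|h|h|h|h
  · exact Or.inl (key '0' h)
  · exact Or.inr <| Or.inl (key '1' h)
  · exact Or.inr <| Or.inr <| Or.inl (key '2' h)
  · exact Or.inr <| Or.inr <| Or.inr <| Or.inl (key '3' h)
  · exact Or.inr <| Or.inr <| Or.inr <| Or.inr <| Or.inl (key '4' h)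
  · exact Or.inr <| Or.inr <| Or.inr <| Or.inr <| Or.inr <| Or.inl (key '5' h)
  · exact Or.inr <| Or.inr <| Or.inr <| Or.inr <| Or.inr <| Or.inr <| Or.inl (key '6' h)
  · exact Or.inr <| Or.inr <| Or.inr <| Or.inr <| Or.inr <| Or.inr <| Or.inr <| Or.inl (key '7' h)
  · exact Or.inr <| Or.inr <| Or.inr <| Or.inr <| Or.inr <| Or.inr <| Or.inr <| Or.inr (key '8' h)

-- A's inner digit test over one line equals B's run scan of that line
theorem pvLineA_eq (s : String) :
    ((PySem.List.pyRange 0 9 1).any (fun i =>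
      PySem.Str.isIn (PySem.Int.toStr i ++ PySem.Int.toStr i ++ PySem.Int.toStr i) s))
    = pvHasRun s.toList := by
  have h9 : PySem.List.pyRange 0 9 1 = [0,1,2,3,4,5,6,7,8] := by decide
  rw [Bool.eq_iff_iff, h9]
  simp only [List.any_cons, List.any_nil, Bool.or_false, Bool.or_eq_true,
    PySem.Str.isIn_iff_infix, pvHasRun_iff]
  have e0 : (PySem.Int.toStr 0 ++ PySem.Int.toStr 0 ++ PySem.Int.toStr 0).toList = ['0','0','0'] := by decide
  have e1 : (PySem.Int.toStr 1 ++ PySem.Int.toStr 1 ++ PySem.Int.toStr 1).toList = ['1','1','1'] := by decide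
  have e2 : (PySem.Int.toStr 2 ++ PySem.Int.toStr 2 ++ PySem.Int.toStr 2).toList = ['2','2','2'] := by decide
  have e3 : (PySem.Int.toStr 3 ++ PySem.Int.toStr 3 ++ PySem.Int.toStr 3).toList = ['3','3','3'] := by decide
  have e4 : (PySem.Int.toStr 4 ++ PySem.Int.toStr 4 ++ PySem.Int.toStr 4).toList = ['4','4','4'] := by decide
  have e5 : (PySem.Int.toStr 5 ++ PySem.Int.toStr 5 ++ PySem.Int.toStr 5).toList = ['5','5','5'] := by decide
  have e6 : (PySem.Int.toStr 6 ++ PySem.Int.toStr 6 ++ PySem.Int.toStr 6).toList = ['6','6','6'] := by decide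
  have e7 : (PySem.Int.toStr 7 ++ PySem.Int.toStr 7 ++ PySem.Int.toStr 7).toList = ['7','7','7'] := by decide
  have e8 : (PySem.Int.toStr 8 ++ PySem.Int.toStr 8 ++ PySem.Int.toStr 8).toList = ['8','8','8'] := by decide
  rw [e0, e1, e2, e3, e4, e5, e6, e7, e8]
  constructor
  · rintro (h|h|h|h|h|h|h|h|h)
    · exact ⟨'0', by decide, by decide, h⟩
    · exact ⟨'1', by decide, by decide, h⟩
    · exact ⟨'2', by decide, by decide, h⟩
    · exact ⟨'3', by decide, by decide, h⟩
    · exact ⟨'4', by decide, by decide, h⟩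
    · exact ⟨'5', by decide, by decide, h⟩
    · exact ⟨'6', by decide, by decide, h⟩
    · exact ⟨'7', by decide, by decide, h⟩
    · exact ⟨'8', by decide, by decide, h⟩
  · rintro ⟨d, h1, h2, h3⟩
    rcases pvDigit_cases d h1 h2 with rfl|rfl|rfl|rfl|rfl|rfl|rfl|rfl|rfl
    · exact Or.inl h3
    · exact Or.inr <| Or.inl h3
    · exact Or.inr <| Or.inr <| Or.inl h3
    · exact Or.inr <| Or.inr <| Or.inr <| Or.inl h3
    · exact Or.inr <| Or.inr <| Or.inr <| Or.inr <| Or.inl h3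
    · exact Or.inr <| Or.inr <| Or.inr <| Or.inr <| Or.inr <| Or.inl h3
    · exact Or.inr <| Or.inr <| Or.inr <| Or.inr <| Or.inr <| Or.inr <| Or.inl h3
    · exact Or.inr <| Or.inr <| Or.inr <| Or.inr <| Or.inr <| Or.inr <| Or.inr <| Or.inl h3
    · exact Or.inr <| Or.inr <| Or.inr <| Or.inr <| Or.inr <| Or.inr <| Or.inr <| Or.inr h3

theorem pvAnyAnyComm {α β : Type} (xs : List α) (ys : List β) (p : α → β → Bool) :
    (xs.any fun i => ys.any fun j => p i j) = (ys.any fun j => xs.any fun i => p i j) := by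
  rw [Bool.eq_iff_iff]
  simp only [List.any_eq_true]
  constructor
  · rintro ⟨i, hi, j, hj, h⟩; exact ⟨j, hj, i, hi, h⟩
  · rintro ⟨j, hj, i, hi, h⟩; exact ⟨i, hi, j, hj, h⟩

-- ''.join = flatten on the char-list side
theorem pvJoinEmpty_toList (parts : List String) :
    (PySem.Str.join "" parts).toList = (parts.map String.toList).flatten := by
  rw [PySem.Str.toList_join]
  show PySem.Chars.join [] (parts.map String.toList) = _
  induction parts with
  | nil => simp [PySem.Chars.join_nil]
  | cons p rest ih =>
    rcases rest with _ | ⟨q, rest'⟩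
    · simp [PySem.Chars.join_singleton]
    · simp only [List.map_cons] at ih ⊢
      rw [PySem.Chars.join_cons_cons, ih]
      simp

-- A's string-accumulating column fold, on the char-list side
theorem pvFoldCol_toList (l : List (List String)) (k : Nat) : ∀ (acc : String),
    (l.foldl (fun stroka row => stroka ++ PySem.List.pyGetD row (k : Int) "") acc).toList
    = acc.toList ++ (l.map (fun row => (row.getD k "").toList)).flatten := by
  induction l with
  | nil => intro acc; simp
  | cons r rest ih =>
    intro acc
    rw [List.foldl_cons, ih]
    simp [PySem.List.pyGetD_natCast, String.toList_append]

theorem pvMinD_head (a : Nat) (rest : List Nat) (h : ∀ x ∈ rest, a ≤ x) :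
    PySem.List.minD (a :: rest) id 0 = a := by
  have inv : ∀ (f : Option Nat → Nat → Option Nat) (l : List Nat),
      (∀ x ∈ l, f (some a) x = some a) → l.foldl f (some a) = some a := by
    intro f l
    induction l with
    | nil => intro _; rfl
    | cons x rest' ih =>
      intro hx
      rw [List.foldl_cons, hx x (by simp)]
      exact ih (fun y hy => hx y (by simp [hy]))
  have hmin : PySem.List.min? (a :: rest) id = some a := by
    show List.foldl _ none (a :: rest) = some a
    rw [List.foldl_cons]
    refine inv _ rest ?_
    intro x hx
    have hax : ¬ (x < a) := by
      have := h x hx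
      omega
    show (if id x < id a then some x else some a) = some a
    simp only [id_eq, if_neg hax]
  show (PySem.List.min? (a :: rest) id).getD 0 = a
  rw [hmin]
  rfl

theorem pvIf3 (x y : Bool) : (if x then true else if y then true else false) = (x || y) := by
  cases x <;> cases y <;> rfl

theorem pvIf2 (x y : Bool) : (if x then true else y) = (x || y) := by
  cases x <;> rfl

-- ===== VERDICT (by name: the statement is the Claim_ definition above) =====
theorem is_there_a_combination_spec : Claim_equal_is_there_a_combination := by
  intro level _ hPre
  obtain ⟨hne, hall⟩ := hPre
  unfold Spec_is_there_a_combination is_there_a_combination is_there_a_combination_alt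
  rcases level with _ | ⟨r0, rs⟩
  · exact absurd rfl hne
  -- name the four Bools
  set lvl := r0 :: rs with hlvl
  have hallmin : ∀ x ∈ rs.map List.length, r0.length ≤ x := by
    intro x hx
    simp only [List.mem_map] at hx
    obtain ⟨row, hrow, rfl⟩ := hx
    exact hall row (by simp [hlvl, hrow])
  have hwidth : PySem.List.minD (lvl.map (fun row => row.length)) id 0 = r0.length := by
    simp only [hlvl, List.map_cons]
    exact pvMinD_head r0.length (rs.map List.length) hallmin
  -- horizontal parts agree
  have hH : ((PySem.List.pyRange 0 9 1).any (fun i =>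
        (lvl.map (fun r => PySem.Str.join "" r)).any (fun j =>
          PySem.Str.isIn (PySem.Int.toStr i ++ PySem.Int.toStr i ++ PySem.Int.toStr i) j)))
      = lvl.any (fun row => pvHasRun (PySem.Str.join "" row).toList) := by
    rw [pvAnyAnyComm]
    rw [List.any_map]
    exact List.any_congr rfl (fun r => pvLineA_eq (PySem.Str.join "" r))
  -- the column strings agree (as char lists) for k < width
  have hcol : ∀ (k : Nat),
      ((lvl.foldl (fun stroka row => stroka ++ PySem.List.pyGetD row (k : Int) "") "").toList)
      = (PySem.Str.join "" (lvl.map (fun row => row.getD k ""))).toList := by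
    intro k
    rw [pvFoldCol_toList, pvJoinEmpty_toList]
    simp [List.map_map, Function.comp_def]
  -- vertical parts agree
  have hV : ((PySem.List.pyRange 0 9 1).any (fun i =>
        (((PySem.List.pyRange 0 (PySem.List.len (lvl.headD [])) 1).map
            (fun i => lvl.foldl (fun stroka row => stroka ++ PySem.List.pyGetD row i "") "")).any
          (fun j => PySem.Str.isIn (PySem.Int.toStr i ++ PySem.Int.toStr i ++ PySem.Int.toStr i) j))))
      = (List.range (PySem.List.minD (lvl.map (fun row => row.length)) id 0)).any
          (fun k => pvHasRun (PySem.Str.join "" (lvl.map (fun row => row.getD k ""))).toList) := by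
    rw [pvAnyAnyComm, hwidth]
    have hlen : PySem.List.len (lvl.headD []) = ((r0.length : Nat) : Int) := by
      simp [hlvl, PySem.List.len_eq]
    rw [hlen, PySem.List.pyRange_zero_natCast, List.map_map, List.any_map]
    refine List.any_congr rfl (fun k => ?_)
    simp only [Function.comp_def]
    rw [pvLineA_eq, hcol k]
  rw [pvIf3, pvIf2, hH, hV]
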